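-- pv_equiv track=rewrite | github.com/VictorWinberg/hashcode2018 | hanna.py | fillVectors
-- ===== SOURCE A (Python) =====
-- def fillVectors(rides, N):
--   start, end, e_start, l_finish = [], [], [], []
--   for ride in range(N):
--     digits = [int(s) for s in rides[ride].split() if s.isdigit()]
--     start.append((digits[0], digits[1]))
--     end.append((digits[2],digits[3]))
--     e_start.append(digits[4])
--     l_finish.append(digits[5])
--   return start, end, e_start, l_finish
-- ===== SOURCE B (Python) =====
-- def fillVectors(rides, N):
--   flat = []
--   for i in range(N):
--     flat += [int(s) for s in rides[i].split() if s.isdigit()][:6]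
--   start = list(zip(flat[0::6], flat[1::6]))
--   end = list(zip(flat[2::6], flat[3::6]))
--   e_start = flat[4::6]
--   l_finish = flat[5::6]
--   return start, end, e_start, l_finish
-- ===== Notes on version B (the rewrite author's own statement) =====
-- stated objective: alternative
-- what changed: Instead of appending to four parallel accumulators per ride, B concatenates the first six parsed ints of each ride into one flat buffer and extracts the four outputs as stride-6 slices (flat[k::6]) zipped into pairs.
import Mathlib
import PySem

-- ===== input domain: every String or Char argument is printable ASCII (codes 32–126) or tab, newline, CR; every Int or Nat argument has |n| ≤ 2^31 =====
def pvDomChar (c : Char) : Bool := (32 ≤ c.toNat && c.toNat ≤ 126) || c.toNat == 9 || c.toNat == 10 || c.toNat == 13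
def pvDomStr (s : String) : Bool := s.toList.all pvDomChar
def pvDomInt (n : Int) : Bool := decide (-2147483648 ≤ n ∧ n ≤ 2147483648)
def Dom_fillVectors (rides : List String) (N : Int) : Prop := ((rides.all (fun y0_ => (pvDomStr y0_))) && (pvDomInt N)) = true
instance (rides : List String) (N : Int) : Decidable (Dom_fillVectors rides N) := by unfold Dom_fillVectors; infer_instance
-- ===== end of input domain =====

-- B replaces A's four parallel append-accumulators with one flat buffer of the first six ints per ride, read back as stride-6 slices; objective: alternative (same cost, different data layout).


-- shared parse helper: [int(s) for s in line.split() if s.isdigit()]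
-- (s.isdigit() guarantees int(s) parses on the ASCII domain, so the .getD 0 default is never used)
def pvDigits (line : String) : List Int :=
  ((PySem.Str.split₀ line).filter (fun s => PySem.Str.strIsdigit s)).map
    (fun s => (PySem.Int.ofStr? s).getD 0)

-- ===== PORT A =====
def fillVectors (rides : List String) (N : Int) : (List (Int × Int)) × (List (Int × Int)) × List Int × List Int :=
  (PySem.List.pyRange 0 N 1).foldl
    (fun (acc : (List (Int × Int)) × (List (Int × Int)) × List Int × List Int) ride =>
      let digits := pvDigits (PySem.List.pyGetD rides ride "")
      (acc.1 ++ [(PySem.List.pyGetD digits 0 0, PySem.List.pyGetD digits 1 0)],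
       acc.2.1 ++ [(PySem.List.pyGetD digits 2 0, PySem.List.pyGetD digits 3 0)],
       acc.2.2.1 ++ [PySem.List.pyGetD digits 4 0],
       acc.2.2.2 ++ [PySem.List.pyGetD digits 5 0]))
    ([], [], [], [])

-- ===== PORT B =====
-- flat += digits[:6] per ride, then the four outputs are stride-6 slices flat[k::6] (zipped into pairs)
def fillVectors_alt (rides : List String) (N : Int) : (List (Int × Int)) × (List (Int × Int)) × List Int × List Int :=
  let flat := (PySem.List.pyRange 0 N 1).foldl
    (fun (acc : List Int) i =>
      acc ++ PySem.List.slice (pvDigits (PySem.List.pyGetD rides i "")) none (some 6)) []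
  let col := fun (k : Int) => (PySem.List.slice? flat (some k) none 6).getD []
  ((col 0).zip (col 1), (col 2).zip (col 3), col 4, col 5)

-- ===== PRECONDITION & SPEC =====
-- Pre_ excludes exactly the inputs where Python A raises: rides[ride] out of range (IndexError,
-- when N exceeds len(rides)) or a line among the first N with fewer than 6 digit tokens (IndexError on digits[k]).
def Pre_fillVectors (rides : List String) (N : Int) : Prop :=
  N ≤ (rides.length : Int) ∧ ∀ s ∈ rides.take N.toNat, 6 ≤ (pvDigits s).length
instance (rides : List String) (N : Int) : Decidable (Pre_fillVectors rides N) := by unfold Pre_fillVectors; infer_instance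

def pvWitness_fillVectors : List String × Int := (["0 1 2 3 4 5"], 1)

def Spec_fillVectors (rides : List String) (N : Int) (out : (List (Int × Int)) × (List (Int × Int)) × List Int × List Int) : Prop := out = fillVectors_alt rides N
instance (rides : List String) (N : Int) (out : (List (Int × Int)) × (List (Int × Int)) × List Int × List Int) : Decidable (Spec_fillVectors rides N out) := by unfold Spec_fillVectors; infer_instance

-- ===== CLAIM (what is proved, stated in full; the proofs are below) =====
def Claim_equal_fillVectors : Prop := ∀ (rides : List String) (N : Int), Dom_fillVectors rides N → Pre_fillVectors rides N → Spec_fillVectors rides N (fillVectors rides N)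

-- ===== LEMMAS AND PROOFS =====
-- A's fused loop over four append-accumulators equals four column maps.
theorem pvFoldQuad {α : Type} (f1 f2 : α → Int × Int) (f3 f4 : α → Int) (l : List α)
    (a b : List (Int × Int)) (c d : List Int) :
    l.foldl (fun (acc : (List (Int × Int)) × (List (Int × Int)) × List Int × List Int) x =>
        (acc.1 ++ [f1 x], acc.2.1 ++ [f2 x], acc.2.2.1 ++ [f3 x], acc.2.2.2 ++ [f4 x])) (a, b, c, d)
      = (a ++ l.map f1, b ++ l.map f2, c ++ l.map f3, d ++ l.map f4) := by
  induction l generalizing a b c d with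
  | nil => simp
  | cons x xs ih => simp [List.foldl_cons, ih]

-- index into a flatten of uniform length-6 rows
theorem pvFlattenIdx (rows : List (List Int)) (h : ∀ r ∈ rows, r.length = 6)
    (k j : Nat) (hk : k < 6) (hj : j < rows.length) :
    rows.flatten[(k + 6 * j)]? = some ((rows[j]'hj).getD k 0) := by
  induction rows generalizing j with
  | nil => simp at hj
  | cons r rs ih =>
    have hr : r.length = 6 := h r (by simp)
    cases j with
    | zero =>
      simp only [Nat.mul_zero, Nat.add_zero, List.flatten_cons]
      rw [List.getElem?_append_left (by omega)]
      simp [List.getD, hr.symm ▸ hk]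
    | succ j' =>
      have : k + 6 * (j' + 1) = r.length + (k + 6 * j') := by omega
      rw [List.flatten_cons, this, List.getElem?_append_right (by omega)]
      simp only [Nat.add_sub_cancel_left]
      rw [ih (fun x hx => h x (by simp [hx])) j' (by simpa using hj)]
      simp

-- length of a flatten of uniform length-6 rows
theorem pvFlatLen (rows : List (List Int)) (h : ∀ r ∈ rows, r.length = 6) :
    rows.flatten.length = 6 * rows.length := by
  induction rows with
  | nil => simp
  | cons r rs ih =>
    have := ih (fun x hx => h x (by simp [hx]))
    simp [h r (by simp)] at this ⊢
    omega

-- stride-6 slice of a flatten of uniform length-6 rows is the k-th column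
theorem pvStride6 (rows : List (List Int)) (h : ∀ r ∈ rows, r.length = 6)
    (k : Nat) (hk : k < 6) :
    PySem.List.slice? rows.flatten (some (k : Int)) none 6
      = some (rows.map (fun r => r.getD k 0)) := by
  have flatIdx := fun j hj => pvFlattenIdx rows h k j hk hj
  have hlen := pvFlatLen rows h
  unfold PySem.List.slice? PySem.List.sliceIndices
  simp only [if_neg (by norm_num : (6:Int) ≠ 0)]
  simp only [show ¬ ((6:Int) < 0) by norm_num, if_false, hlen]
  set n := rows.length with hn
  rcases Nat.eq_zero_or_pos n with h0 | hpos
  · have hr : rows = [] := by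
      apply List.eq_nil_of_length_eq_zero; omega
    subst hr
    simp
  · have hmin : (if (↑k:Int) < 0 then max (↑k + (↑(6*n):Int)) 0 else min ↑k ↑(6*n)) = (↑k:Int) := by
      rw [if_neg (by omega)]
      have : (k:Int) ≤ ↑(6*n) := by push_cast; omega
      omega
    rw [hmin]
    rw [if_pos (by norm_num : (0:Int) < 6), if_pos (show (k:Int) < ((6*n:Nat):Int) by push_cast; omega)]
    have hcnt : (((((6*n:Nat):Int) - (k:Int)) + 6 - 1) / 6).toNat = n := by push_cast; omega
    rw [hcnt]
    rw [List.filterMap_congr (g := fun x => some ((rows.getD x []).getD k 0)) ?_]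
    · rw [show (fun x => some ((rows.getD x []).getD k 0)) = some ∘ (fun x => (rows.getD x []).getD k 0) from rfl,
         List.filterMap_eq_map]
      congr 1
      apply List.ext_getElem (by simp [hn])
      intro i h1 h2
      simp [List.getD_eq_getElem?_getD, List.getElem?_eq_getElem (by simpa [hn] using h2)]
    · intro x hx
      have hxn : x < n := List.mem_range.mp hx
      have ht : ((k:Int) + 6 * (x:Int)).toNat = k + 6 * x := by omega
      rw [ht, flatIdx x (by omega)]
      congr 1
      simp [List.getD_eq_getElem?_getD, List.getElem?_eq_getElem (by omega : x < rows.length)]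

-- each of B's stride-6 columns is the per-ride column map
theorem pvCol (rides : List String) (N : Int) (hNlen : N ≤ (rides.length : Int))
    (htake : ∀ s ∈ rides.take N.toNat, 6 ≤ (pvDigits s).length) (c : Nat) (hc : c < 6) :
    (PySem.List.slice?
        (((PySem.List.pyRange 0 N 1).map
            (fun i => (pvDigits (PySem.List.pyGetD rides i "")).take 6)).flatten)
        (some (c : Int)) none 6).getD []
      = (PySem.List.pyRange 0 N 1).map
          (fun i => (pvDigits (PySem.List.pyGetD rides i "")).getD c 0) := by
  set rows := (PySem.List.pyRange 0 N 1).map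
      (fun i => (pvDigits (PySem.List.pyGetD rides i "")).take 6) with hrows
  have hd : ∀ i ∈ PySem.List.pyRange 0 N 1, 6 ≤ (pvDigits (PySem.List.pyGetD rides i "")).length := by
    intro i hi
    obtain ⟨h0i, hiN⟩ := (PySem.List.mem_pyRange_one).mp hi
    have hilen : i < (rides.length : Int) := lt_of_lt_of_le hiN hNlen
    rw [PySem.List.pyGetD_eq_getElem rides "" h0i hilen]
    apply htake
    have hidx : i.toNat < (rides.take N.toNat).length := by
      simp [List.length_take]; omega
    have := List.getElem_mem hidx
    rwa [List.getElem_take] at this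
  have hU : ∀ r ∈ rows, r.length = 6 := by
    intro r hr
    obtain ⟨i, hi, rfl⟩ := List.mem_map.mp hr
    have := hd i hi
    simp [List.length_take]
    omega
  rw [pvStride6 rows hU c hc, Option.getD_some, hrows, List.map_map]
  apply List.map_congr_left
  intro i hi
  have := hd i hi
  simp [List.getD_eq_getElem?_getD, hc]
theorem fillVectors_spec : Claim_equal_fillVectors := by
  intro rides N _ hpre
  obtain ⟨hNlen, htake⟩ := hpre
  unfold Spec_fillVectors fillVectors fillVectors_alt
  rw [pvFoldQuad, PySem.List.foldl_append_eq_flatMap]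
  have hsl : ∀ xs : List Int, PySem.List.slice xs none (some 6) = xs.take 6 := by
    intro xs
    have := PySem.List.slice_to xs (b := 6) (by norm_num)
    simpa using this
  simp only [hsl, List.flatMap_def, List.nil_append]
  have h0 := pvCol rides N hNlen htake 0 (by norm_num)
  have h1 := pvCol rides N hNlen htake 1 (by norm_num)
  have h2 := pvCol rides N hNlen htake 2 (by norm_num)
  have h3 := pvCol rides N hNlen htake 3 (by norm_num)
  have h4 := pvCol rides N hNlen htake 4 (by norm_num)
  have h5 := pvCol rides N hNlen htake 5 (by norm_num)
  push_cast at h0 h1 h2 h3 h4 h5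
  rw [h0, h1, h2, h3, h4, h5, List.zip_map', List.zip_map']
  refine Prod.ext ?_ (Prod.ext ?_ (Prod.ext ?_ ?_)) <;>
    · apply List.map_congr_left
      intro i _
      simp [PySem.List.pyGetD_ofNat']
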